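-- pv_equiv track=rewrite | github.com/Jampar/JP-Programming | Python/Pycharm Python Code/Euler Problems/Euler 92.py | produce_chain
-- ===== SOURCE A (Python) =====
-- chain = []
--
-- def number_to_digit(n):
--     d = [int(d) for d in str(n)]
--     return d
--
-- def square_digits(d):
--     s = [int(i)**2 for i in d]
--     return s
--
-- def next_number(n):
--     return sum(square_digits(number_to_digit(n)))
--
-- def produce_chain(s):
--     n = next_number(s)
--     if(n == 1 or n== 89):
--         chain.append(n)
--         chain.clear()
--         return n
--     else:
--         chain.append(n)
--         return produce_chain(n)
-- ===== SOURCE B (Python) =====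
-- def produce_chain(s):
--     n = sum(int(d) ** 2 for d in str(s))
--     while n != 1 and n != 89:
--         n = sum(int(d) ** 2 for d in str(n))
--     return n
-- ===== Notes on version B (the rewrite author's own statement) =====
-- stated objective: simpler
-- what changed: Replaced A's recursive helper chain (number_to_digit/square_digits/next_number plus the dead global `chain` list) by a single iterative while-loop with the digit-square sum inlined as one generator expression.
-- outside the precondition, e.g. on produce_chain(0): A raises RecursionError, B does not finish within the time limit; on produce_chain(-5): A raises ValueError, B raises ValueError
import Mathlib
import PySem

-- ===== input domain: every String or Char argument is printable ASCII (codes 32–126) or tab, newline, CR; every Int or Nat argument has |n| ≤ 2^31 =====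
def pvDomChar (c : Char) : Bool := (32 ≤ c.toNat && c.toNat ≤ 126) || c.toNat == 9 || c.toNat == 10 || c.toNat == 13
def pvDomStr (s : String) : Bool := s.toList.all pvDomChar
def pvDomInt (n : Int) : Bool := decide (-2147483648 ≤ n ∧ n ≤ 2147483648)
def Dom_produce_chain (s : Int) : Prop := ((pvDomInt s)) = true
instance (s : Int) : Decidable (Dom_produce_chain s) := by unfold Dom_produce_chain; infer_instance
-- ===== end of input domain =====

-- B replaces A's recursion + helper chain by one iterative loop with the digit-square sum
-- inlined (objective: simpler). A also appends to / clears a global `chain` list whose net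
-- post-call state is empty; the equivalence proved here is about the RETURN value only.

-- ===== PORT A =====
-- int(d) on a single character: exact when the character is a decimal digit (guaranteed for
-- str(n) with n ≥ 1, i.e. inside Pre_); Python raises ValueError otherwise (excluded by Pre_).
def number_to_digit (n : Int) : List Int :=
  (PySem.Int.toStr n).toList.map (fun c => (PySem.Int.ofStr? (String.singleton c)).getD 0)

def square_digits (d : List Int) : List Int := d.map (fun i => i ^ 2)

def next_number (n : Int) : Int := (square_digits (number_to_digit n)).sum

-- fuel makes the Python recursion total; 1000 exceeds any chain length reachable from Pre_
def produce_chain_go : Nat → Int → Int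
  | 0, _ => 0
  | f + 1, s =>
    let n := next_number s
    if n = 1 ∨ n = 89 then n else produce_chain_go f n

def produce_chain (s : Int) : Int := produce_chain_go 1000 s

-- ===== PORT B =====
-- sum(int(d) ** 2 for d in str(n)), as one fold over the characters of str(n)
def pv_dsq (n : Int) : Int :=
  (PySem.Int.toStr n).toList.foldl
    (fun acc c => acc + ((PySem.Int.ofStr? (String.singleton c)).getD 0) ^ 2) 0

-- the while-loop, fuelled like A's recursion
def pv_whileB : Nat → Int → Int
  | 0, _ => 0
  | f + 1, n => if n ≠ 1 ∧ n ≠ 89 then pv_whileB f (pv_dsq n) else n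

def produce_chain_alt (s : Int) : Int := pv_whileB 1000 (pv_dsq s)

-- ===== PRECONDITION & SPEC =====
-- Pre_ excludes s ≤ 0: for s < 0 the Python raises ValueError (int('-')), and for s = 0 the
-- recursion never terminates (next_number 0 = 0); A returns on no excluded input.
def Pre_produce_chain (s : Int) : Prop := 1 ≤ s
instance (s : Int) : Decidable (Pre_produce_chain s) := by unfold Pre_produce_chain; infer_instance
def pvWitness_produce_chain : Int := 44

def Spec_produce_chain (s : Int) (out : Int) : Prop := out = produce_chain_alt s
instance (s : Int) (out : Int) : Decidable (Spec_produce_chain s out) := by unfold Spec_produce_chain; infer_instance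

-- ===== CLAIM (what is proved, stated in full; the proofs are below) =====
def Claim_equal_produce_chain : Prop := ∀ (s : Int), Dom_produce_chain s → Pre_produce_chain s → Spec_produce_chain s (produce_chain s)

-- ===== LEMMAS AND PROOFS =====

-- B's inline fold computes A's next_number
theorem pv_dsq_eq_next_number (n : Int) : pv_dsq n = next_number n := by
  unfold pv_dsq next_number square_digits number_to_digit
  rw [List.map_map, List.sum_eq_foldl, List.foldl_map]
  simp [Function.comp]

-- the fuelled recursion equals the fuelled while-loop started after the first step
theorem pv_go_eq_while (f : Nat) : ∀ s : Int, produce_chain_go f s = pv_whileB f (pv_dsq s) := by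
  induction f with
  | zero => intro s; rfl
  | succ f ih =>
    intro s
    rw [produce_chain_go, pv_whileB, pv_dsq_eq_next_number]
    by_cases h : next_number s = 1 ∨ next_number s = 89
    · rw [if_pos h, if_neg (by tauto)]
    · rw [if_neg h, if_pos (by tauto), ih]

-- ===== VERDICT (by name: the statement is the Claim_ definition above) =====
theorem produce_chain_spec : Claim_equal_produce_chain := by
  intro s _ _
  unfold Spec_produce_chain produce_chain produce_chain_alt
  exact pv_go_eq_while 1000 s
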